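-- pv_equiv track=rewrite | github.com/DongDongHyuk/WorldSkills_DongHyuk | 02. 과제/기능경기대회/지방과제/2022/2022 지방 3과제/.점수 먹기/idle/총합 7점 .py | dire
-- ===== SOURCE A (Python) =====
-- it = [0,1,1,2,2,0,0,0] # 1 : 사각 2 : 원형
--
-- def dire(n):
--     y = [-1,-1,0,1,1,1,0,-1]
--     x = [0,1,1,1,0,-1,-1,-1]
--     result = []
--     for i in range(8):
--         if it[i] == n:
--             result.append([y[i],x[i]])
--     return result
-- ===== SOURCE B (Python) =====
-- it = [0,1,1,2,2,0,0,0] # 1 : 사각 2 : 원형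
--
-- # Precomputed index: tile value -> list of [y,x] offsets, built once at module load.
-- _offsets_by_type = {}
-- _y = [-1,-1,0,1,1,1,0,-1]
-- _x = [0,1,1,1,0,-1,-1,-1]
-- for _i in range(8):
--     _offsets_by_type.setdefault(it[_i], []).append([_y[_i], _x[_i]])
--
-- def dire(n):
--     return [list(p) for p in _offsets_by_type.get(n, [])]
-- ===== Notes on version B (the rewrite author's own statement) =====
-- stated objective: idiomatic
-- what changed: B builds a dict from tile value to its [y,x] offset list once at module load and dire is a plain lookup returning a fresh copy, replacing A's per-call linear scan over the direction table.
import Mathlib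
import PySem

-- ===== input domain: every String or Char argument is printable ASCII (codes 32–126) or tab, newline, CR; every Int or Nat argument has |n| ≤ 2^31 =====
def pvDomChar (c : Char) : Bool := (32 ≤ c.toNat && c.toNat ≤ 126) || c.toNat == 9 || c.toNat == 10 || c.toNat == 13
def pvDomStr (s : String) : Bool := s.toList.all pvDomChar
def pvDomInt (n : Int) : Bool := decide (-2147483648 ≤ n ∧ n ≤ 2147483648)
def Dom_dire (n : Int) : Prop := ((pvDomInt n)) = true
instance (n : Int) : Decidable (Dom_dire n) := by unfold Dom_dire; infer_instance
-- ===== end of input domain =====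

-- B builds a dict from tile value to its offset list once; dire is a lookup returning a copy (idiomatic).

-- ===== PORT A =====
def itA : List Int := [0, 1, 1, 2, 2, 0, 0, 0]

def dire (n : Int) : List (List Int) :=
  let y : List Int := [-1, -1, 0, 1, 1, 1, 0, -1]
  let x : List Int := [0, 1, 1, 1, 0, -1, -1, -1]
  (PySem.List.pyRange 0 8 1).foldl (fun result i =>
    if PySem.List.pyGetD itA i 0 = n then
      result ++ [[PySem.List.pyGetD y i 0, PySem.List.pyGetD x i 0]]
    else result) []

-- ===== PORT B =====
def itB : List Int := [0, 1, 1, 2, 2, 0, 0, 0]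
def yB : List Int := [-1, -1, 0, 1, 1, 1, 0, -1]
def xB : List Int := [0, 1, 1, 1, 0, -1, -1, -1]

-- module-load table: for i in range(8): _offsets_by_type.setdefault(it[i], []).append([y[i], x[i]])
def offsetsByType : PySem.Dict Int (List (List Int)) :=
  (PySem.List.pyRange 0 8 1).foldl (fun d i =>
    d.insert (PySem.List.pyGetD itB i 0)
      ((d.getD (PySem.List.pyGetD itB i 0) []) ++
        [[PySem.List.pyGetD yB i 0, PySem.List.pyGetD xB i 0]])) PySem.Dict.empty

def dire_alt (n : Int) : List (List Int) :=
  (offsetsByType.getD n []).map (fun p => p)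

-- ===== PRECONDITION & SPEC =====
def Spec_dire (n : Int) (out : List (List Int)) : Prop := out = dire_alt n
instance (n : Int) (out : List (List Int)) : Decidable (Spec_dire n out) := by unfold Spec_dire; infer_instance

-- ===== CLAIM (what is proved, stated in full; the proofs are below) =====
def Claim_equal_dire : Prop := ∀ (n : Int), Dom_dire n → Spec_dire n (dire n)

-- ===== LEMMAS AND PROOFS =====
theorem dire_other (n : Int) (h0 : n ≠ 0) (h1 : n ≠ 1) (h2 : n ≠ 2) :
    dire n = [] ∧ dire_alt n = [] := by
  constructor
  · simp [dire, itA, show PySem.List.pyRange 0 8 1 = [0,1,2,3,4,5,6,7] from by decide,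
      PySem.List.pyGetD, PySem.List.pyGet?, PySem.List.pyIdx?, Ne.symm h0, Ne.symm h1, Ne.symm h2]
  · simp [dire_alt, offsetsByType, itB, yB, xB,
      show PySem.List.pyRange 0 8 1 = [0,1,2,3,4,5,6,7] from by decide,
      PySem.List.pyGetD, PySem.List.pyGet?, PySem.List.pyIdx?,
      PySem.Dict.getD_insert, PySem.Dict.getD_empty, h0, h1, h2]

-- ===== VERDICT (by name: the statement is the Claim_ definition above) =====
theorem dire_spec : Claim_equal_dire := by
  intro n _
  unfold Spec_dire
  by_cases h0 : n = 0
  · subst h0; decide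
  by_cases h1 : n = 1
  · subst h1; decide
  by_cases h2 : n = 2
  · subst h2; decide
  obtain ⟨ha, hb⟩ := dire_other n h0 h1 h2
  rw [ha, hb]
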